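-- pv_equiv track=rewrite | github.com/thependalorian/buffrhost | microservices/loyalty-service/main.py | calculate_tier
-- ===== SOURCE A (Python) =====
-- from typing import Optional, Dict, Any, List
-- from enum import Enum
--
-- class LoyaltyTier(str, Enum):
--     BRONZE = "bronze"
--     SILVER = "silver"
--     GOLD = "gold"
--     PLATINUM = "platinum"
--     DIAMOND = "diamond"
--
-- def calculate_tier(points: int, tier_config: Dict[str, Any]) -> str:
--     """Calculate loyalty tier based on points"""
--     tiers = tier_config.get("tiers", {})
--
--     # Sort tiers by minimum points
--     sorted_tiers = sorted(tiers.items(), key=lambda x: x[1].get("min_points", 0), reverse=True)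
--
--     for tier_name, tier_data in sorted_tiers:
--         min_points = tier_data.get("min_points", 0)
--         if points >= min_points:
--             return tier_name
--
--     return LoyaltyTier.BRONZE
-- ===== SOURCE B (Python) =====
-- from typing import Optional, Dict, Any, List
-- from enum import Enum
--
-- class LoyaltyTier(str, Enum):
--     BRONZE = "bronze"
--     SILVER = "silver"
--     GOLD = "gold"
--     PLATINUM = "platinum"
--     DIAMOND = "diamond"
--
-- def calculate_tier(points: int, tier_config: Dict[str, Any]) -> str:
--     """Calculate loyalty tier based on points (single pass, no sort)."""
--     tiers = tier_config.get("tiers", {})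
--     best_name = None
--     best_min = 0
--     for tier_name, tier_data in tiers.items():
--         min_points = tier_data.get("min_points", 0)
--         if min_points <= points and (best_name is None or min_points > best_min):
--             best_name = tier_name
--             best_min = min_points
--     return best_name if best_name is not None else LoyaltyTier.BRONZE
-- ===== Notes on version B (the rewrite author's own statement) =====
-- stated objective: faster
-- what changed: Replaced sort-descending-then-scan with a single pass that keeps the best qualifying tier (strict > on min_points reproduces the stable-sort tie-break).
import Mathlib
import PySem

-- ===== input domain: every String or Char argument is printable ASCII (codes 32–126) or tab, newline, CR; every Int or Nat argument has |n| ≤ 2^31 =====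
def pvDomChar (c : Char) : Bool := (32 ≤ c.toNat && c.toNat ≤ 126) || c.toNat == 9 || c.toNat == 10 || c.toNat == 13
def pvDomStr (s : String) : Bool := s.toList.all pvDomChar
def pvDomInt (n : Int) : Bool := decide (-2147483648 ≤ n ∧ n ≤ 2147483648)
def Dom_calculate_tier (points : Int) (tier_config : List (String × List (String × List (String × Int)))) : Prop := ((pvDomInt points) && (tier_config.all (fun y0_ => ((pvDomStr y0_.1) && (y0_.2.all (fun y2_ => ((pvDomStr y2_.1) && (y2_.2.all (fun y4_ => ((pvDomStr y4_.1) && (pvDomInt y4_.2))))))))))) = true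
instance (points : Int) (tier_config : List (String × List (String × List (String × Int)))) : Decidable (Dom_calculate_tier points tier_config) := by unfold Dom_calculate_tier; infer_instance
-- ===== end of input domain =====

-- B replaces A's descending sort + scan with a single best-so-far pass over the tiers (O(n) instead of O(n log n) comparisons).


-- ===== PORT A =====
-- the 'for tier_name, tier_data in sorted_tiers: … return …' loop
def pvScanA (points : Int) : List (String × List (String × Int)) → String
  | [] => "bronze"          -- return LoyaltyTier.BRONZE (a str enum with value "bronze")
  | (tier_name, tier_data) :: rest =>
      let min_points := PySem.Dict.getD ⟨tier_data⟩ "min_points" 0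
      if points ≥ min_points then tier_name else pvScanA points rest

def calculate_tier (points : Int) (tier_config : List (String × List (String × List (String × Int)))) : String :=
  let tiers := PySem.Dict.getD ⟨tier_config⟩ "tiers" []
  let sorted_tiers := PySem.List.sorted tiers (fun x => PySem.Dict.getD ⟨x.2⟩ "min_points" 0) true
  pvScanA points sorted_tiers

-- ===== PORT B =====
-- loop body: update (best_name, best_min) when this tier qualifies and beats the best so far
def pvStepB (points : Int) (acc : Option (String × Int)) (t : String × List (String × Int)) : Option (String × Int) :=
  let min_points := PySem.Dict.getD ⟨t.2⟩ "min_points" 0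
  match acc with
  | none => if min_points ≤ points then some (t.1, min_points) else none
  | some (bn, bm) => if min_points ≤ points ∧ bm < min_points then some (t.1, min_points) else some (bn, bm)

def calculate_tier_alt (points : Int) (tier_config : List (String × List (String × List (String × Int)))) : String :=
  let tiers := PySem.Dict.getD ⟨tier_config⟩ "tiers" []
  match tiers.foldl (pvStepB points) none with
  | some (best_name, _) => best_name
  | none => "bronze"

-- ===== PRECONDITION & SPEC =====
def Spec_calculate_tier (points : Int) (tier_config : List (String × List (String × List (String × Int)))) (out : String) : Prop := out = calculate_tier_alt points tier_config
instance (points : Int) (tier_config : List (String × List (String × List (String × Int)))) (out : String) : Decidable (Spec_calculate_tier points tier_config out) := by unfold Spec_calculate_tier; infer_instance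

-- ===== CLAIM (what is proved, stated in full; the proofs are below) =====
def Claim_equal_calculate_tier : Prop := ∀ (points : Int) (tier_config : List (String × List (String × List (String × Int)))), Dom_calculate_tier points tier_config → Spec_calculate_tier points tier_config (calculate_tier points tier_config)

-- ===== LEMMAS AND PROOFS =====

-- the key of a tier entry
def pvKey (x : String × List (String × Int)) : Int := PySem.Dict.getD ⟨x.2⟩ "min_points" 0

-- first qualifying element of a list, as an option
def pvFirst? (points : Int) : List (String × List (String × Int)) → Option (String × List (String × Int))
  | [] => none
  | y :: t => if pvKey y ≤ points then some y else pvFirst? points t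

lemma pvScanA_eq_first? (points : Int) (s : List (String × List (String × Int))) :
    pvScanA points s = (match pvFirst? points s with
      | some b => b.1
      | none => "bronze") := by
  induction s with
  | nil => rfl
  | cons y t ih =>
      simp only [pvScanA, pvFirst?, pvKey, ge_iff_le]
      split_ifs with h
      · rfl
      · exact ih

-- inserting x into s (before the first strictly-smaller key) transforms the first
-- qualifying element exactly as B's best-so-far update does
lemma first?_insertBy (points : Int) (x : String × List (String × Int))
    (s : List (String × List (String × Int))) :
    pvFirst? points (PySem.List.insertBy (fun a b => decide (pvKey b < pvKey a)) x s) =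
      (match pvFirst? points s with
        | none => if pvKey x ≤ points then some x else none
        | some b => if pvKey x ≤ points ∧ pvKey b < pvKey x then some x else some b) := by
  induction s with
  | nil => simp [PySem.List.insertBy, pvFirst?]
  | cons y t ih =>
      by_cases hyx : pvKey y < pvKey x
      · have hins : PySem.List.insertBy (fun a b => decide (pvKey b < pvKey a)) x (y :: t)
            = x :: y :: t := by simp [PySem.List.insertBy, hyx]
        rw [hins]
        by_cases hx : pvKey x ≤ points
        · have hy : pvKey y ≤ points := le_trans (le_of_lt hyx) hx
          simp [pvFirst?, hx, hy, hyx]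
        · have hstep : pvFirst? points (x :: y :: t) = pvFirst? points (y :: t) := by
            simp [pvFirst?, hx]
          rw [hstep]
          cases h : pvFirst? points (y :: t) <;> simp [hx]
      · have hins : PySem.List.insertBy (fun a b => decide (pvKey b < pvKey a)) x (y :: t)
            = y :: PySem.List.insertBy (fun a b => decide (pvKey b < pvKey a)) x t := by
          simp [PySem.List.insertBy, hyx]
        rw [hins]
        by_cases hy : pvKey y ≤ points
        · have : ¬ pvKey y < pvKey x := hyx
          simp [pvFirst?, hy, this]
        · simp [pvFirst?, hy, ih]

-- B's fold state is the first qualifying element of A's (incrementally built) sorted list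
lemma foldB_eq (points : Int) (l : List (String × List (String × Int))) :
    l.foldl (pvStepB points) none =
      (pvFirst? points
        (l.foldl (fun acc x => PySem.List.insertBy (fun a b => decide (pvKey b < pvKey a)) x acc) [])).map
        (fun b => (b.1, pvKey b)) := by
  induction l using List.reverseRecOn with
  | nil => rfl
  | append_singleton l x ih =>
      rw [List.foldl_append, List.foldl_append]
      simp only [List.foldl_cons, List.foldl_nil]
      rw [first?_insertBy, ih]
      cases h : pvFirst? points
          (l.foldl (fun acc x => PySem.List.insertBy (fun a b => decide (pvKey b < pvKey a)) x acc) []) with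
      | none => simp only [Option.map_none, pvStepB, pvKey]; split_ifs <;> simp
      | some b => simp only [Option.map_some, pvStepB, pvKey]; split_ifs <;> simp

-- ===== VERDICT (by name: the statement is the Claim_ definition above) =====
theorem calculate_tier_spec : Claim_equal_calculate_tier := by
  intro points tier_config _
  unfold Spec_calculate_tier calculate_tier calculate_tier_alt
  have hk : (fun x : String × List (String × Int) => PySem.Dict.getD ⟨x.2⟩ "min_points" 0) = pvKey := rfl
  simp only []
  rw [hk, PySem.List.sorted_rev_eq_foldl_insertBy, pvScanA_eq_first?, foldB_eq]
  cases h : pvFirst? points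
      ((PySem.Dict.getD ⟨tier_config⟩ "tiers" []).foldl
        (fun acc x => PySem.List.insertBy (fun a b => decide (pvKey b < pvKey a)) x acc) []) <;> simp
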